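-- pv_equiv track=rewrite | github.com/shenzuzhenwang/ETO | ETO/eto3.py | partition_knapsacks
-- ===== SOURCE A (Python) =====
-- def partition_knapsacks(items, k):
--     if k <= 0 or not items:
--         return []
--     knapsacks = [[] for _ in range(k)]
--     sums = [0] * k
--     sorted_items = sorted(items, key=lambda x: x[1], reverse=True)
--     for item in sorted_items:
--         min_idx = sums.index(min(sums))
--         knapsacks[min_idx].append(item)
--         sums[min_idx] += item[1]
--     return knapsacks
-- ===== SOURCE B (Python) =====
-- def partition_knapsacks(items, k):
--     if k <= 0 or not items:
--         return []
--     knapsacks = [[] for _ in range(k)]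
--     # pool of (load, index) pairs kept sorted ascending; head = least-loaded sack
--     pool = [(0, i) for i in range(k)]
--     for item in sorted(items, key=lambda x: x[1], reverse=True):
--         s, i = pool.pop(0)
--         knapsacks[i].append(item)
--         entry = (s + item[1], i)
--         lo, hi = 0, len(pool)
--         while lo < hi:  # binary search for entry's insertion point
--             mid = (lo + hi) // 2
--             if pool[mid] < entry:
--                 lo = mid + 1
--             else:
--                 hi = mid
--         pool.insert(lo, entry)
--     return knapsacks
-- ===== Notes on version B (the rewrite author's own statement) =====
-- stated objective: faster
-- what changed: Instead of rescanning the whole sums array per item (min + index), B keeps a pool of (load, index) pairs sorted ascending, pops the head as the least-loaded knapsack and re-inserts the updated pair at a binary-searched position.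
import Mathlib
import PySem

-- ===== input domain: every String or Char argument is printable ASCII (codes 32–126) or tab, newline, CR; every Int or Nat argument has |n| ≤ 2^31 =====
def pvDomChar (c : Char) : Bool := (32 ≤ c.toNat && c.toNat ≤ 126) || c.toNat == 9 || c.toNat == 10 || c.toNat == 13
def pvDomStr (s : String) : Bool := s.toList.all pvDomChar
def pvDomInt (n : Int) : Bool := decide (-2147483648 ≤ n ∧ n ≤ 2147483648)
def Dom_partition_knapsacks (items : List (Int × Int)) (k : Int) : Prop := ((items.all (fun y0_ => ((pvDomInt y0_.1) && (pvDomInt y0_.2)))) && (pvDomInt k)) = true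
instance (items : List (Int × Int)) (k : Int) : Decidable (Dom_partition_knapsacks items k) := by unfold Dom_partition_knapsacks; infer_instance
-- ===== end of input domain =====

-- B replaces A's per-item full scans of `sums` (min + index) by a pool of (load, index)
-- pairs kept sorted ascending (pop head, binary-search re-insertion); same return value.

-- ===== PORT A =====
-- one iteration of A's loop: scan sums for the minimum, take its first index, put the item there
def pkStepA (st : List (List (Int × Int)) × List Int) (item : Int × Int) :
    List (List (Int × Int)) × List Int :=
  let m := (PySem.List.min? st.2 (fun x => x)).getD 0      -- min(sums); sums nonempty here, default unused
  let idx := (PySem.List.index? st.2 m).getD 0             -- sums.index(min(sums)); m ∈ sums, default unused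
  (st.1.set idx (st.1.getD idx [] ++ [item]), st.2.set idx (st.2.getD idx 0 + item.2))

def partition_knapsacks (items : List (Int × Int)) (k : Int) : List (List (Int × Int)) :=
  if k ≤ 0 ∨ items = [] then []
  else
    ((PySem.List.sorted items (fun x => x.2) true).foldl pkStepA
      ((List.range k.toNat).map (fun _ => []), List.replicate k.toNat 0)).1

-- ===== PORT B =====
-- Python's tuple comparison `pool[mid] < entry` (lexicographic on (load, index))
def pkLtb (a b : Int × Nat) : Bool := decide (a.1 < b.1) || (decide (a.1 = b.1) && decide (a.2 < b.2))

-- Source B's `while lo < hi` binary-search loop for the insertion point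
def pkFindPos (pool : List (Int × Nat)) (entry : Int × Nat) (lo hi : Nat) : Nat :=
  if lo < hi then
    let mid := (lo + hi) / 2
    if pkLtb (pool.getD mid (0, 0)) entry then pkFindPos pool entry (mid + 1) hi
    else pkFindPos pool entry lo mid
  else lo
termination_by hi - lo
decreasing_by all_goals omega

-- one iteration of Source B's loop: pop the least-loaded (head), binary-search re-insertion
def pkStepB (st : List (List (Int × Int)) × List (Int × Nat)) (item : Int × Int) :
    List (List (Int × Int)) × List (Int × Nat) :=
  match st with
  | (kn, []) => (kn, [])        -- unreachable: the pool always holds k > 0 entries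
  | (kn, (s, i) :: rest) =>
    let entry := (s + item.2, i)
    let pos := pkFindPos rest entry 0 rest.length
    -- pool.insert(lo, entry): here 0 ≤ lo ≤ len(pool), where insertIdx is exactly Python's insert
    (kn.set i (kn.getD i [] ++ [item]), rest.insertIdx pos entry)

def partition_knapsacks_alt (items : List (Int × Int)) (k : Int) : List (List (Int × Int)) :=
  if k ≤ 0 ∨ items = [] then []
  else
    ((PySem.List.sorted items (fun x => x.2) true).foldl pkStepB
      ((List.range k.toNat).map (fun _ => []), (List.range k.toNat).map (fun i => ((0 : Int), i)))).1

-- ===== PRECONDITION & SPEC =====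
def Spec_partition_knapsacks (items : List (Int × Int)) (k : Int) (out : List (List (Int × Int))) : Prop := out = partition_knapsacks_alt items k
instance (items : List (Int × Int)) (k : Int) (out : List (List (Int × Int))) : Decidable (Spec_partition_knapsacks items k out) := by unfold Spec_partition_knapsacks; infer_instance

-- ===== CLAIM (what is proved, stated in full; the proofs are below) =====
def Claim_equal_partition_knapsacks : Prop := ∀ (items : List (Int × Int)) (k : Int), Dom_partition_knapsacks items k → Spec_partition_knapsacks items k (partition_knapsacks items k)

-- ===== LEMMAS AND PROOFS =====

-- the Prop version of the lexicographic order on (load, index) pairs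
def pkLt (a b : Int × Nat) : Prop := a.1 < b.1 ∨ (a.1 = b.1 ∧ a.2 < b.2)

lemma pkLtb_iff (a b : Int × Nat) : pkLtb a b = true ↔ pkLt a b := by
  simp [pkLtb, pkLt]

lemma pkLt_trans {a b c : Int × Nat} (h1 : pkLt a b) (h2 : pkLt b c) : pkLt a c := by
  obtain ⟨a1, a2⟩ := a; obtain ⟨b1, b2⟩ := b; obtain ⟨c1, c2⟩ := c
  simp only [pkLt] at *; omega

lemma pkLt_of_not_of_ne {a b : Int × Nat} (h : ¬ pkLt a b) (hne : a ≠ b) : pkLt b a := by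
  obtain ⟨a1, a2⟩ := a; obtain ⟨b1, b2⟩ := b
  simp only [pkLt, ne_eq, Prod.mk.injEq] at *; omega

-- loop invariant: the pool is the (load, index) pairing of A's sums array, sorted ascending
def pkInv (sums : List Int) (pool : List (Int × Nat)) : Prop :=
  sums ≠ [] ∧ pool.Pairwise pkLt ∧ pool.Perm sums.zipIdx

-- the binary-search loop returns the first position whose entry is not lexicographically smaller
lemma pkFindPos_spec (pool : List (Int × Nat)) (entry : Int × Nat) (lo hi : Nat)
    (hs : pool.Pairwise pkLt) (hhi : hi ≤ pool.length) (hlh : lo ≤ hi)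
    (h1 : ∀ j (hj : j < pool.length), j < lo → pkLt pool[j] entry)
    (h2 : ∀ j (hj : j < pool.length), hi ≤ j → ¬ pkLt pool[j] entry) :
    (∀ j (hj : j < pool.length), j < pkFindPos pool entry lo hi → pkLt pool[j] entry) ∧
    (∀ j (hj : j < pool.length), pkFindPos pool entry lo hi ≤ j → ¬ pkLt pool[j] entry) ∧
    pkFindPos pool entry lo hi ≤ pool.length := by
  fun_induction pkFindPos pool entry lo hi with
  | case1 lo hi hlt mid hmid ih =>
    have hmlt : mid < pool.length := by omega
    have hmem : pool.getD mid (0,0) = pool[mid] := List.getD_eq_getElem pool (0,0) hmlt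
    rw [hmem, pkLtb_iff] at hmid
    have hpw := List.pairwise_iff_getElem.mp hs
    exact ih hhi (by omega)
      (fun j hj hjlt => by
        rcases Nat.lt_or_ge j mid with h | h
        · exact pkLt_trans (hpw j mid hj hmlt h) hmid
        · have : j = mid := by omega
          subst this; exact hmid)
      h2
  | case2 lo hi hlt mid hmid ih =>
    have hmlt : mid < pool.length := by omega
    have hmem : pool.getD mid (0,0) = pool[mid] := List.getD_eq_getElem pool (0,0) hmlt
    rw [hmem] at hmid
    have hmid' : ¬ pkLt pool[mid] entry := fun hc => by simp [(pkLtb_iff _ _).2 hc] at hmid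
    have hpw := List.pairwise_iff_getElem.mp hs
    exact ih (by omega) (by omega) h1
      (fun j hj hge => by
        rcases Nat.lt_or_ge j (mid+1) with h | h
        · have : j = mid := by omega
          subst this; exact hmid'
        · exact fun hc => hmid' (pkLt_trans (hpw mid j hmlt hj (by omega)) hc))
  | case3 lo hi hge =>
    have : lo = hi := by omega
    subst this
    exact ⟨fun j hj hjlt => h1 j hj hjlt, fun j hj hgej => h2 j hj hgej, by omega⟩

-- inserting a fresh entry at the found position keeps the pool sorted
lemma pk_insert_pairwise (l : List (Int × Nat)) (e : Int × Nat)
    (hs : l.Pairwise pkLt) (hfresh : ∀ x ∈ l, x.2 ≠ e.2) :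
    (l.insertIdx (pkFindPos l e 0 l.length) e).Pairwise pkLt := by
  obtain ⟨hlt, hge, hle⟩ := pkFindPos_spec l e 0 l.length hs le_rfl (Nat.zero_le _)
    (fun j hj h => absurd h (Nat.not_lt_zero j)) (fun j hj h => absurd hj (by omega))
  set pos := pkFindPos l e 0 l.length with hpos
  have hfr : ∀ (j : Nat) (hj : j < l.length), pkLt e l[j] ∨ pkLt l[j] e := by
    intro j hj
    by_cases h : pkLt l[j] e
    · exact Or.inr h
    · exact Or.inl (pkLt_of_not_of_ne h (fun he => hfresh l[j] (l.getElem_mem hj) (by rw [he])))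
  have hlen : (l.insertIdx pos e).length = l.length + 1 := by
    rw [List.length_insertIdx]; simp [hle]
  refine List.pairwise_iff_getElem.mpr ?_
  intro i j hi hj hij
  rw [hlen] at hi hj
  rw [List.getElem_insertIdx, List.getElem_insertIdx]
  split_ifs with h1 h2 h3 h4 h5 h6 h7 h8
  · exact List.pairwise_iff_getElem.mp hs i j (by omega) (by omega) hij
  · exact hlt i (by omega) h1
  · rcases Nat.lt_or_ge i (j-1) with h | h
    · exact List.pairwise_iff_getElem.mp hs i (j-1) (by omega) (by omega) h
    · have : i = j - 1 := by omega
      subst this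
      exact absurd h1 (by omega)
  · exact absurd hij (by omega)
  · exact absurd hij (by omega)
  · have hj1 : j - 1 < l.length := by omega
    rcases hfr (j-1) hj1 with h | h
    · exact h
    · exact absurd h (hge (j-1) hj1 (by omega))
  · exact absurd hij (by omega)
  · exact absurd hij (by omega)
  · exact List.pairwise_iff_getElem.mp hs (i-1) (j-1) (by omega) (by omega) (by omega)

lemma pk_zipIdx_set (sums : List Int) (i : Nat) (v : Int) :
    (sums.set i v).zipIdx = sums.zipIdx.set i (v, i) := by
  apply List.ext_getElem
  · simp
  · intro j h1 h2
    simp only [List.getElem_zipIdx, List.getElem_set] at *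
    split <;> simp_all

-- the head of the sorted pool is exactly (min(sums), sums.index(min(sums)))
lemma pk_head (sums : List Int) (s : Int) (i : Nat) (rest : List (Int × Nat))
    (hinv : pkInv sums ((s, i) :: rest)) :
    ∃ (hi : i < sums.length), sums[i] = s ∧
      (PySem.List.min? sums (fun x => x)).getD 0 = s ∧
      (PySem.List.index? sums s).getD 0 = i := by
  obtain ⟨hne, hpw, hperm⟩ := hinv
  have hmemz : (s, i) ∈ sums.zipIdx := hperm.mem_iff.mp (List.mem_cons_self)
  obtain ⟨hilt, hsi⟩ := List.mem_zipIdx' hmemz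
  have hzmem : ∀ (j : Nat) (hj : j < sums.length), (sums[j], j) ∈ ((s, i) :: rest) := by
    intro j hj
    refine hperm.mem_iff.mpr ?_
    have : sums.zipIdx[j]'(by simpa using hj) = (sums[j], j) := by
      simp [List.getElem_zipIdx]
    exact this ▸ List.getElem_mem _
  -- head is lexicographically ≤ every (sums[j], j)
  have hhead : ∀ (j : Nat) (hj : j < sums.length), (s, i) = (sums[j], j) ∨ pkLt (s, i) (sums[j], j) := by
    intro j hj
    rcases List.mem_cons.mp (hzmem j hj) with h | h
    · exact Or.inl h.symm
    · exact Or.inr ((List.pairwise_cons.mp hpw).1 _ h)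
  -- min(sums) = s
  obtain ⟨m, hm⟩ : ∃ m, PySem.List.min? sums (fun x => x) = some m := by
    cases h : PySem.List.min? sums (fun x => x) with
    | none => exact absurd ((PySem.List.min?_eq_none_iff sums _).mp h) hne
    | some m => exact ⟨m, rfl⟩
  have hms : m = s := by
    have hle1 : m ≤ s := PySem.List.min?_isMin hm s (hsi ▸ List.getElem_mem hilt)
    obtain ⟨j, hj, hjm⟩ := List.mem_iff_getElem.mp (PySem.List.min?_mem hm)
    rcases hhead j hj with h | h
    · have : s = sums[j] := congrArg Prod.fst h
      omega
    · rcases h with h | h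
      · simp only [hjm] at h; omega
      · have := h.1; simp only [hjm] at this; omega
  -- sums.index(s) = i
  obtain ⟨j0, hj0⟩ : ∃ j0, PySem.List.index? sums s = some j0 := by
    cases h : PySem.List.index? sums s with
    | none =>
      have := (PySem.List.index?_isSome_iff sums s).mpr (hsi ▸ List.getElem_mem hilt)
      rw [h] at this; simp at this
    | some j0 => exact ⟨j0, rfl⟩
  obtain ⟨hj0lt, hj0v, hj0min⟩ := PySem.List.getElem_of_index?_eq_some hj0
  have hij0 : i = j0 := by
    rcases Nat.lt_trichotomy i j0 with h | h | h
    · exact absurd hsi.symm (hj0min i h)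
    · exact h
    · rcases hhead j0 hj0lt with hh | hh
      · exact (congrArg Prod.snd hh)
      · rcases hh with hh | hh
        · simp only [hj0v] at hh; omega
        · exact absurd hh.2 (by omega)
  exact ⟨hilt, hsi.symm, by rw [hm, hms]; rfl, by rw [hj0, ← hij0]; rfl⟩

-- one loop iteration preserves the invariant
lemma pk_step_inv (sums : List Int) (s : Int) (i : Nat) (rest : List (Int × Nat)) (w : Int)
    (hinv : pkInv sums ((s, i) :: rest)) :
    pkInv (sums.set i (s + w))
      (rest.insertIdx (pkFindPos rest (s + w, i) 0 rest.length) (s + w, i)) := by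
  obtain ⟨hne, hpw, hperm⟩ := hinv
  obtain ⟨hilt, hsi, _, _⟩ := pk_head sums s i rest ⟨hne, hpw, hperm⟩
  have hfresh : ∀ x ∈ rest, x.2 ≠ (s + w, i).2 := by
    have hnd : (((s, i) :: rest).map Prod.snd).Nodup :=
      ((hperm.map Prod.snd).nodup_iff).mpr (List.nodup_zipIdx_map_snd sums)
    simp only [List.map_cons, List.nodup_cons] at hnd
    intro x hx he
    have : x.2 ∈ rest.map Prod.snd := List.mem_map_of_mem (f := Prod.snd) hx
    rw [he] at this
    exact hnd.1 this
  have hrest_pw : rest.Pairwise pkLt := (List.pairwise_cons.mp hpw).2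
  refine ⟨by simp [← List.length_pos_iff_ne_nil] at hne ⊢; omega, ?_, ?_⟩
  · exact pk_insert_pairwise rest (s + w, i) hrest_pw hfresh
  · -- permutation part
    have hle : pkFindPos rest (s + w, i) 0 rest.length ≤ rest.length :=
      (pkFindPos_spec rest (s + w, i) 0 rest.length hrest_pw le_rfl (Nat.zero_le _)
        (fun j hj h => absurd h (Nat.not_lt_zero j)) (fun j hj h => absurd hj (by omega))).2.2
    have h1 : (rest.insertIdx (pkFindPos rest (s + w, i) 0 rest.length) (s + w, i)).Perm
        ((s + w, i) :: rest) := List.perm_insertIdx _ _ hle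
    have hzi : sums.zipIdx[i]'(by simpa using hilt) = (s, i) := by
      simp [List.getElem_zipIdx, hsi]
    have h2 : sums.zipIdx.Perm ((s, i) :: sums.zipIdx.eraseIdx i) := by
      have h := List.set_perm_cons_eraseIdx (l := sums.zipIdx) (n := i) (by simpa using hilt) (s, i)
      have he : sums.zipIdx.set i (s, i) = sums.zipIdx := by
        conv_lhs => rw [← hzi]
        exact List.set_getElem_self _
      rwa [he] at h
    have hrest : rest.Perm (sums.zipIdx.eraseIdx i) :=
      ((hperm.trans h2).cons_inv)
    have h3 : (sums.set i (s + w)).zipIdx.Perm ((s + w, i) :: sums.zipIdx.eraseIdx i) := by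
      rw [pk_zipIdx_set]
      exact List.set_perm_cons_eraseIdx (by simpa using hilt) _
    exact h1.trans ((hrest.cons _).trans h3.symm)

-- both loops, run over the same items from the same knapsack state, build the same knapsacks
lemma pk_fold (its : List (Int × Int)) :
    ∀ (kn : List (List (Int × Int))) (sums : List Int) (pool : List (Int × Nat)),
      pkInv sums pool →
      (its.foldl pkStepA (kn, sums)).1 = (its.foldl pkStepB (kn, pool)).1 := by
  induction its with
  | nil => intro kn sums pool _; rfl
  | cons it its ih =>
    intro kn sums pool hinv
    obtain ⟨s, i, rest, hp⟩ : ∃ s i rest, pool = (s, i) :: rest := by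
      match pool with
      | [] =>
        have hlen := hinv.2.2.length_eq
        simp only [List.length_nil, List.length_zipIdx] at hlen
        exact absurd hlen.symm (by simpa [List.length_eq_zero_iff] using hinv.1)
      | (s, i) :: rest => exact ⟨s, i, rest, rfl⟩
    subst hp
    obtain ⟨hilt, hsi, hmin, hidx⟩ := pk_head sums s i rest hinv
    simp only [List.foldl_cons]
    have hstepA : pkStepA (kn, sums) it =
        (kn.set i (kn.getD i [] ++ [it]), sums.set i (s + it.2)) := by
      simp only [pkStepA, hmin, hidx]
      rw [List.getD_eq_getElem sums 0 hilt, hsi]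
    have hstepB : pkStepB (kn, (s, i) :: rest) it =
        (kn.set i (kn.getD i [] ++ [it]),
          rest.insertIdx (pkFindPos rest (s + it.2, i) 0 rest.length) (s + it.2, i)) := rfl
    rw [hstepA, hstepB]
    exact ih _ _ _ (pk_step_inv sums s i rest it.2 hinv)

lemma pk_init_inv (n : Nat) (hn : 0 < n) :
    pkInv (List.replicate n 0) ((List.range n).map (fun i => ((0 : Int), i))) := by
  refine ⟨by simp; omega, ?_, ?_⟩
  · rw [List.pairwise_map]
    refine List.Pairwise.imp ?_ (List.pairwise_lt_range)
    intro a b h; exact Or.inr ⟨rfl, h⟩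
  · have : (List.replicate n (0:Int)).zipIdx = (List.range n).map (fun i => ((0 : Int), i)) := by
      apply List.ext_getElem <;> simp [List.getElem_zipIdx]
    rw [this]

-- ===== VERDICT (by name: the statement is the Claim_ definition above) =====
theorem partition_knapsacks_spec : Claim_equal_partition_knapsacks := by
  intro items k _
  unfold Spec_partition_knapsacks partition_knapsacks partition_knapsacks_alt
  split
  · rfl
  · rename_i h
    have hk : 0 < k.toNat := by
      rw [not_or] at h; omega
    exact pk_fold _ _ _ _ (pk_init_inv k.toNat hk)
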